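-- pv_equiv track=rewrite | github.com/ZG21/Algorithm-Checker | Subsets.py | separar_dict_y_crear_posiciones
-- ===== SOURCE A (Python) =====
-- def separar_dict_y_crear_posiciones(original_dict):
--     # Separar en dos diccionarios
--     con_valores = {k: v for k, v in original_dict.items() if v}
--     sin_valores = {k: v for k, v in original_dict.items() if not v}
--     # Crear diccionarios de posiciones
--     posiciones_con_valores = {k: i for i, k in enumerate(con_valores.keys())}
--     posiciones_sin_valores = {k: i for i, k in enumerate(sin_valores.keys())}
--     #Crear el diccionario final
--     resultado = {
--         "actual": posiciones_con_valores,
--         "future": posiciones_sin_valores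
--     }
--     return resultado
-- ===== SOURCE B (Python) =====
-- def separar_dict_y_crear_posiciones(original_dict):
--     # One pass with two position counters; never builds the intermediate
--     # con_valores / sin_valores dicts.
--     posiciones_con_valores = {}
--     posiciones_sin_valores = {}
--     i_con = 0
--     i_sin = 0
--     for k, v in original_dict.items():
--         if v:
--             posiciones_con_valores[k] = i_con
--             i_con += 1
--         else:
--             posiciones_sin_valores[k] = i_sin
--             i_sin += 1
--     return {"actual": posiciones_con_valores, "future": posiciones_sin_valores}
-- ===== Notes on version B (the rewrite author's own statement) =====
-- stated objective: simpler
-- what changed: Replaces A's four dict comprehensions (two filtering passes plus two enumerate passes over the intermediate dicts) by a single pass over the items with two position counters, never materialising the intermediate con_valores/sin_valores dicts.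
import Mathlib
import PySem

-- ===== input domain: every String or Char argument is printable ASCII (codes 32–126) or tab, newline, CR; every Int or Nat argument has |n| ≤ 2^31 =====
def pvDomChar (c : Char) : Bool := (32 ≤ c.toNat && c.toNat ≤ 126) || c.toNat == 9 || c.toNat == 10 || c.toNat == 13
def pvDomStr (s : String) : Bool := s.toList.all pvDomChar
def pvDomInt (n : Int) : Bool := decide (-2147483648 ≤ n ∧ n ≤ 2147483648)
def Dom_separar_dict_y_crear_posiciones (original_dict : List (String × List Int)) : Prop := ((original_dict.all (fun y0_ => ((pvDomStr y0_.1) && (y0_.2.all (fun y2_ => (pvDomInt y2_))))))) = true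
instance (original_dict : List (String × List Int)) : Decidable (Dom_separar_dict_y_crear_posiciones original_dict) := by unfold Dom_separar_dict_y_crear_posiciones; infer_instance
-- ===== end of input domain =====

-- B replaces A's four dict comprehensions by a single pass over the items with two
-- position counters (same values; objective: simpler, one traversal).


-- ===== PORT A =====
-- {k: v for k, v in original_dict.items() if v} etc., then positions via enumerate(keys)
def separar_dict_y_crear_posiciones (original_dict : List (String × List Int)) : List (String × List (String × Int)) :=
  let con_valores : PySem.Dict String (List Int) :=
    original_dict.foldl (fun acc kv => if kv.2 ≠ [] then acc.insert kv.1 kv.2 else acc) PySem.Dict.empty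
  let sin_valores : PySem.Dict String (List Int) :=
    original_dict.foldl (fun acc kv => if kv.2 = [] then acc.insert kv.1 kv.2 else acc) PySem.Dict.empty
  let posiciones_con_valores : PySem.Dict String Int :=
    (PySem.List.enumerate con_valores.keys).foldl (fun acc ik => acc.insert ik.2 ik.1) PySem.Dict.empty
  let posiciones_sin_valores : PySem.Dict String Int :=
    (PySem.List.enumerate sin_valores.keys).foldl (fun acc ik => acc.insert ik.2 ik.1) PySem.Dict.empty
  [("actual", posiciones_con_valores.items), ("future", posiciones_sin_valores.items)]

-- ===== PORT B =====
-- single loop: for k, v in items: assign current counter to the matching positions dict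
def sepGoB : List (String × List Int) → Int → Int → PySem.Dict String Int → PySem.Dict String Int →
    PySem.Dict String Int × PySem.Dict String Int
  | [], _, _, pc, ps => (pc, ps)
  | (k, v) :: rest, i_con, i_sin, pc, ps =>
    if v ≠ [] then sepGoB rest (i_con + 1) i_sin (pc.insert k i_con) ps
    else sepGoB rest i_con (i_sin + 1) pc (ps.insert k i_sin)

def separar_dict_y_crear_posiciones_alt (original_dict : List (String × List Int)) : List (String × List (String × Int)) :=
  let r := sepGoB original_dict 0 0 PySem.Dict.empty PySem.Dict.empty
  [("actual", r.1.items), ("future", r.2.items)]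

-- ===== PRECONDITION & SPEC =====
-- Pre_ excludes association lists with duplicate keys: a Python dict cannot contain
-- duplicate keys, so such lists do not encode any input the Python function receives.
def Pre_separar_dict_y_crear_posiciones (original_dict : List (String × List Int)) : Prop :=
  (original_dict.map Prod.fst).Nodup
instance (original_dict : List (String × List Int)) : Decidable (Pre_separar_dict_y_crear_posiciones original_dict) := by unfold Pre_separar_dict_y_crear_posiciones; infer_instance
def pvWitness_separar_dict_y_crear_posiciones : (List (String × List Int)) := [("a", [1, 2]), ("b", []), ("c", [0])]

def Spec_separar_dict_y_crear_posiciones (original_dict : List (String × List Int)) (out : List (String × List (String × Int))) : Prop := out = separar_dict_y_crear_posiciones_alt original_dict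
instance (original_dict : List (String × List Int)) (out : List (String × List (String × Int))) : Decidable (Spec_separar_dict_y_crear_posiciones original_dict out) := by unfold Spec_separar_dict_y_crear_posiciones; infer_instance

-- ===== CLAIM (what is proved, stated in full; the proofs are below) =====
def Claim_equal_separar_dict_y_crear_posiciones : Prop := ∀ (original_dict : List (String × List Int)), Dom_separar_dict_y_crear_posiciones original_dict → Pre_separar_dict_y_crear_posiciones original_dict → Spec_separar_dict_y_crear_posiciones original_dict (separar_dict_y_crear_posiciones original_dict)

-- ===== LEMMAS AND PROOFS =====

-- positions list: keys paired with consecutive indices starting at n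
def pvPosList : List String → Int → List (String × Int)
  | [], _ => []
  | k :: ks, n => (k, n) :: pvPosList ks (n + 1)

theorem pv_enumerate_map_swap (ks : List String) (s : Int) :
    (PySem.List.enumerate ks s).map (fun ik => (ik.2, ik.1)) = pvPosList ks s := by
  induction ks generalizing s with
  | nil => simp [PySem.List.enumerate_nil, pvPosList]
  | cons k ks ih => simp [PySem.List.enumerate_cons, pvPosList, ih]

-- A's position dict over nodup keys: items are the enumerated pairs, swapped
theorem pv_items_empty {κ ν : Type} [BEq κ] : (PySem.Dict.empty : PySem.Dict κ ν).items = [] := rfl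

theorem pv_posdict_items (ks : List String) (h : ks.Nodup) :
    ((PySem.List.enumerate ks).foldl (fun acc ik => acc.insert ik.2 ik.1) PySem.Dict.empty).items
      = pvPosList ks 0 := by
  have hfold := PySem.Dict.items_foldl_insert_fresh (PySem.List.enumerate ks)
      (fun ik => ik.2) (fun ik => ik.1) PySem.Dict.empty
      (by intro a _; simp [PySem.Dict.contains_empty])
      (by rw [PySem.List.map_snd_enumerate]; exact h)
  simpa [pv_items_empty, pv_enumerate_map_swap] using hfold

-- A's filtered dict over fresh nodup keys: items are the filtered pairs
theorem pv_filterdict_items (d : List (String × List Int)) (p : String × List Int → Prop)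
    [DecidablePred p] (h : (d.map Prod.fst).Nodup) :
    (d.foldl (fun acc kv => if p kv then acc.insert kv.1 kv.2 else acc)
        (PySem.Dict.empty : PySem.Dict String (List Int))).items
      = d.filter (fun kv => decide (p kv)) := by
  rw [PySem.List.foldl_ite_eq_foldl_filter]
  have hfold := PySem.Dict.items_foldl_insert_fresh
      (d.filter (fun kv => decide (p kv))) (fun kv => kv.1) (fun kv => kv.2)
      (PySem.Dict.empty : PySem.Dict String (List Int))
      (by intro a _; simp [PySem.Dict.contains_empty])
      ((List.Sublist.map Prod.fst (List.filter_sublist (l := d))).nodup h)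
  simpa [pv_items_empty] using hfold

theorem pv_not_contains {κ ν : Type} [BEq κ] [LawfulBEq κ] (d : PySem.Dict κ ν) (k : κ)
    (h : k ∉ d.keys) : d.contains k = false := by
  by_contra hc
  exact h ((PySem.Dict.contains_iff_mem_keys d k).mp (by simpa using hc))

-- B's loop invariant
theorem pv_sepGoB_items (l : List (String × List Int)) (ic is : Int)
    (pc ps : PySem.Dict String Int)
    (hnd : (l.map Prod.fst).Nodup)
    (hpc : ∀ k ∈ l.map Prod.fst, k ∉ pc.keys)
    (hps : ∀ k ∈ l.map Prod.fst, k ∉ ps.keys) :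
    (sepGoB l ic is pc ps).1.items
        = pc.items ++ pvPosList ((l.filter (fun kv => decide (kv.2 ≠ []))).map Prod.fst) ic
    ∧ (sepGoB l ic is pc ps).2.items
        = ps.items ++ pvPosList ((l.filter (fun kv => decide (kv.2 = []))).map Prod.fst) is := by
  induction l generalizing ic is pc ps with
  | nil => simp [sepGoB, pvPosList]
  | cons kv rest ih =>
    obtain ⟨k, v⟩ := kv
    simp only [List.map_cons, List.nodup_cons] at hnd
    have hk_pc : pc.contains k = false := pv_not_contains pc k (hpc k (by simp))
    have hk_ps : ps.contains k = false := pv_not_contains ps k (hps k (by simp))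
    by_cases hv : v ≠ []
    · have ih' := ih (ic + 1) is (pc.insert k ic) ps hnd.2
        (by
          intro k' hk'
          rw [PySem.Dict.keys_insert_of_not_contains pc ic hk_pc]
          intro hmem
          rcases List.mem_append.mp hmem with h1 | h1
          · exact hpc k' (by simp [hk']) h1
          · simp at h1; subst h1; exact hnd.1 hk')
        (fun k' hk' => hps k' (by simp [hk']))
      constructor
      · rw [show sepGoB ((k, v) :: rest) ic is pc ps
              = sepGoB rest (ic + 1) is (pc.insert k ic) ps by simp [sepGoB, hv]]
        rw [ih'.1, PySem.Dict.items_insert_of_not_contains pc ic hk_pc]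
        simp [hv, pvPosList]
      · rw [show sepGoB ((k, v) :: rest) ic is pc ps
              = sepGoB rest (ic + 1) is (pc.insert k ic) ps by simp [sepGoB, hv]]
        rw [ih'.2]
        simp [hv]
    · have hv' : v = [] := by simpa using hv
      subst hv'
      have ih' := ih ic (is + 1) pc (ps.insert k is) hnd.2
        (fun k' hk' => hpc k' (by simp [hk']))
        (by
          intro k' hk'
          rw [PySem.Dict.keys_insert_of_not_contains ps is hk_ps]
          intro hmem
          rcases List.mem_append.mp hmem with h1 | h1
          · exact hps k' (by simp [hk']) h1
          · simp at h1; subst h1; exact hnd.1 hk')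
      constructor
      · rw [show sepGoB ((k, ([] : List Int)) :: rest) ic is pc ps
              = sepGoB rest ic (is + 1) pc (ps.insert k is) by simp [sepGoB]]
        rw [ih'.1]
        simp
      · rw [show sepGoB ((k, ([] : List Int)) :: rest) ic is pc ps
              = sepGoB rest ic (is + 1) pc (ps.insert k is) by simp [sepGoB]]
        rw [ih'.2, PySem.Dict.items_insert_of_not_contains ps is hk_ps]
        simp [pvPosList]

-- ===== VERDICT (by name: the statement is the Claim_ definition above) =====
theorem separar_dict_y_crear_posiciones_spec : Claim_equal_separar_dict_y_crear_posiciones := by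
  intro d _ hpre
  unfold Spec_separar_dict_y_crear_posiciones
  unfold separar_dict_y_crear_posiciones separar_dict_y_crear_posiciones_alt
  have hB := pv_sepGoB_items d 0 0 PySem.Dict.empty PySem.Dict.empty hpre
    (by intro k _; simp [PySem.Dict.keys_empty]) (by intro k _; simp [PySem.Dict.keys_empty])
  have hcon := pv_filterdict_items d (fun kv => kv.2 ≠ []) hpre
  have hsin := pv_filterdict_items d (fun kv => kv.2 = []) hpre
  have hcon_keys :
      (d.foldl (fun acc kv => if kv.2 ≠ [] then acc.insert kv.1 kv.2 else acc)
        (PySem.Dict.empty : PySem.Dict String (List Int))).keys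
        = (d.filter (fun kv => decide (kv.2 ≠ []))).map Prod.fst := by
    simp only [PySem.Dict.keys, hcon]
  have hsin_keys :
      (d.foldl (fun acc kv => if kv.2 = [] then acc.insert kv.1 kv.2 else acc)
        (PySem.Dict.empty : PySem.Dict String (List Int))).keys
        = (d.filter (fun kv => decide (kv.2 = []))).map Prod.fst := by
    simp only [PySem.Dict.keys, hsin]
  have hnod_con : ((d.filter (fun kv => decide (kv.2 ≠ []))).map Prod.fst).Nodup :=
    (List.Sublist.map Prod.fst (List.filter_sublist (l := d))).nodup hpre
  have hnod_sin : ((d.filter (fun kv => decide (kv.2 = []))).map Prod.fst).Nodup :=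
    (List.Sublist.map Prod.fst (List.filter_sublist (l := d))).nodup hpre
  simp only [hcon_keys, hsin_keys]
  rw [pv_posdict_items _ hnod_con, pv_posdict_items _ hnod_sin]
  rw [hB.1, hB.2]
  simp [pv_items_empty]
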